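-- pv_equiv track=rewrite | github.com/Nine1ll/BigLeader | Algorithm/baek2108.py | second_smallest_mode
-- ===== SOURCE A (Python) =====
-- def second_smallest_mode(nums):
--     freq = {}
--     for num in nums:
--         if num in freq:
--             freq[num] += 1
--         else:
--             freq[num] = 1
--
--     max_freq = max(freq.values())
--
--     modes = [num for num, count in freq.items() if count == max_freq]
--
--     modes.sort()
--     if len(modes) > 1:
--         return modes[1]
--     else:
--         return modes[0]
-- ===== SOURCE B (Python) =====
-- def second_smallest_mode(nums):
--     s = sorted(nums)
--     best = 0
--     first = None
--     second = None
--     i = 0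
--     n = len(s)
--     while i < n:
--         j = i
--         while j < n and s[j] == s[i]:
--             j += 1
--         run = j - i
--         if run > best:
--             best, first, second = run, s[i], None
--         elif run == best and second is None:
--             second = s[i]
--         i = j
--     if first is None:
--         raise ValueError("second_smallest_mode() arg is an empty sequence")
--     return first if second is None else second
-- ===== Notes on version B (the rewrite author's own statement) =====
-- stated objective: alternative
-- what changed: B drops the frequency dictionary, the mode-list comprehension and the final sort: it sorts the input once and makes a single run-length pass over the sorted list, keeping the best run length and the first two (ascending) values that attain it.
import Mathlib
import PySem

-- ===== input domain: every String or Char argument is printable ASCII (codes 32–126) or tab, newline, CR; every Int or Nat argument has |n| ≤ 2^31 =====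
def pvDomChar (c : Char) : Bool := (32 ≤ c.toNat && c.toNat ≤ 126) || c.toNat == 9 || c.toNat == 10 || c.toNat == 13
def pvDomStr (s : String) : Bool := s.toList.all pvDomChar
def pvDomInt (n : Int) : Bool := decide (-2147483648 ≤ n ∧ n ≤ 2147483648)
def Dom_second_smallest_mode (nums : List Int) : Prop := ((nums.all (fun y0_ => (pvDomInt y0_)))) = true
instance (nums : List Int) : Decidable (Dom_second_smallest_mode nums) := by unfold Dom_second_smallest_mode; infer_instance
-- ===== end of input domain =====

-- B replaces A's frequency dict + mode-list comprehension + sort of the modes by one sort of the input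
-- followed by a single run-length pass that keeps the first two ascending values of maximal run length
-- (alternative decomposition, same result).

-- ===== PORT A =====
def second_smallest_mode (nums : List Int) : Int :=
  let freq : PySem.Dict Int Int :=
    nums.foldl (fun d num =>
      if d.contains num then d.insert num (d.getD num 0 + 1)
      else d.insert num 1) PySem.Dict.empty
  let max_freq : Int := (PySem.List.max? freq.values (fun y => y)).getD 0
  let modes : List Int := (freq.items.filter (fun p => p.2 == max_freq)).map (fun p => p.1)
  let modes := PySem.List.sorted modes (fun x => x) false
  if modes.length > 1 then PySem.List.pyGetD modes 1 0
  else PySem.List.pyGetD modes 0 0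

-- ===== PORT B =====
-- state update of (best, first, second) for one run of value v with run length r (the if/elif chain of B)
def bupd (st : Int × Option Int × Option Int) (r : Int) (v : Int) : Int × Option Int × Option Int :=
  if r > st.1 then (r, some v, none)
  else if r = st.1 ∧ st.2.2 = none then (st.1, st.2.1, some v)
  else st

-- the outer while loop of B: each step consumes one run (the inner while loop) of the sorted list
def bloop : List Int → Int × Option Int × Option Int → Int × Option Int × Option Int
  | [], st => st
  | x :: rest, st =>
    bloop (rest.dropWhile (fun y => y == x))
      (bupd st (1 + ((rest.takeWhile (fun y => y == x)).length : Int)) x)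
termination_by s _ => s.length
decreasing_by simpa using Nat.lt_succ_of_le (List.length_dropWhile_le _ _)

def second_smallest_mode_alt (nums : List Int) : Int :=
  let st := bloop (PySem.List.sorted nums (fun x => x) false) (0, none, none)
  match st.2.2 with
  | some x => x
  | none => st.2.1.getD 0

-- ===== PRECONDITION & SPEC =====
-- Pre_ excludes only the empty list, on which A raises ValueError (max() of an empty sequence); B raises there too.
def Pre_second_smallest_mode (nums : List Int) : Prop := nums ≠ []
instance (nums : List Int) : Decidable (Pre_second_smallest_mode nums) := by
  unfold Pre_second_smallest_mode; infer_instance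
def pvWitness_second_smallest_mode : List Int := [2, 1, 2, 1, 3]
def Spec_second_smallest_mode (nums : List Int) (out : Int) : Prop := out = second_smallest_mode_alt nums
instance (nums : List Int) (out : Int) : Decidable (Spec_second_smallest_mode nums out) := by
  unfold Spec_second_smallest_mode; infer_instance

-- ===== CLAIM (what is proved, stated in full; the proofs are below) =====
def Claim_equal_second_smallest_mode : Prop := ∀ (nums : List Int), Dom_second_smallest_mode nums → Pre_second_smallest_mode nums → Spec_second_smallest_mode nums (second_smallest_mode nums)

-- ===== LEMMAS AND PROOFS =====

lemma discard_of_not_mem (s : List Int) (x : Int) (h : x ∉ s) : PySem.Set.discard s x = s := by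
  simp only [PySem.Set.discard]
  rw [List.filter_eq_self]
  intro a ha
  simp only [Bool.not_eq_true', beq_eq_false_iff_ne]
  exact fun hax => h (hax ▸ ha)

lemma discard_cons_self (s : List Int) (x : Int) :
    PySem.Set.discard (x :: s) x = PySem.Set.discard s x := by
  simp [PySem.Set.discard]

lemma dedup_cons_all (x : Int) : ∀ (t r : List Int), (∀ y ∈ t, y = x) → x ∉ r →
    PySem.List.dedup (x :: (t ++ r)) = x :: PySem.List.dedup r := by
  intro t
  induction t with
  | nil =>
    intro r _ h2
    simp only [List.nil_append, PySem.List.dedup_eq_ofList, PySem.Set.ofList_cons]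
    rw [discard_of_not_mem]
    intro hx
    exact h2 ((PySem.Set.mem_ofList r x).1 hx)
  | cons a t' ih =>
    intro r h1 h2
    have hax : a = x := h1 a (List.mem_cons_self ..)
    subst hax
    have ih' : PySem.Set.ofList (a :: (t' ++ r)) = a :: PySem.List.dedup r := by
      rw [← PySem.List.dedup_eq_ofList]
      exact ih r (fun y hy => h1 y (List.mem_cons_of_mem _ hy)) h2
    rw [List.cons_append, PySem.List.dedup_eq_ofList, PySem.Set.ofList_cons, ih',
      discard_cons_self, discard_of_not_mem]
    exact fun hx => h2 ((PySem.List.mem_dedup r a).1 hx)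

lemma dedup_sublist (xs : List Int) : (PySem.List.dedup xs).Sublist xs := by
  induction xs with
  | nil => simp [PySem.List.dedup_eq_ofList]
  | cons x xs ih =>
    rw [PySem.List.dedup_eq_ofList, PySem.Set.ofList_cons]
    refine List.Sublist.cons₂ x ?_
    have h1 : (PySem.Set.discard (PySem.Set.ofList xs) x).Sublist (PySem.Set.ofList xs) := by
      simp only [PySem.Set.discard]; exact List.filter_sublist
    exact h1.trans (by rw [← PySem.List.dedup_eq_ofList]; exact ih)

lemma not_mem_dropWhile_beq (x : Int) : ∀ (l : List Int), l.Pairwise (· ≤ ·) →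
    (∀ y ∈ l, x ≤ y) → x ∉ l.dropWhile (fun y => y == x) := by
  intro l
  induction l with
  | nil => simp
  | cons a l' ih =>
    intro hp hall
    by_cases hax : a = x
    · rw [List.dropWhile_cons, if_pos (by simp [hax])]
      exact ih (List.pairwise_cons.1 hp).2 (fun y hy => hall y (List.mem_cons_of_mem _ hy))
    · rw [List.dropWhile_cons, if_neg (by simp [hax])]
      intro hmem
      rcases List.mem_cons.1 hmem with h | h
      · exact hax h.symm
      · have hxa : x ≤ a := hall a (List.mem_cons_self ..)
        have hay : a ≤ x := (List.pairwise_cons.1 hp).1 x h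
        exact hax (le_antisymm hay hxa)

lemma count_cons_append_self (x : Int) (t r : List Int) (h1 : ∀ y ∈ t, y = x) (h2 : x ∉ r) :
    (((x :: (t ++ r)).count x : Nat) : Int) = 1 + (t.length : Int) := by
  have h0 : r.count x = 0 := List.count_eq_zero.2 h2
  have hT : t.count x = t.length := List.count_eq_length.2 (fun b hb => (h1 b hb).symm)
  rw [List.count_cons_self, List.count_append, h0, hT]
  push_cast; ring

lemma count_cons_append_other (x v : Int) (t r : List Int) (h1 : ∀ y ∈ t, y = x)
    (hvx : v ≠ x) : (x :: (t ++ r)).count v = r.count v := by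
  have hvt : v ∉ t := fun hm => hvx (h1 v hm)
  have h0 : t.count v = 0 := List.count_eq_zero.2 hvt
  rw [List.count_cons, List.count_append, h0]
  have hxv : (x == v) = false := beq_eq_false_iff_ne.2 (fun h => hvx h.symm)
  simp [hxv]

-- B's run-length loop over a sorted list is the bupd-fold over the distinct values with their counts
lemma bloop_eq : ∀ (n : Nat) (s : List Int), s.length ≤ n → s.Pairwise (· ≤ ·) →
    ∀ st, bloop s st =
      (PySem.List.dedup s).foldl (fun acc v => bupd acc ((s.count v : Nat) : Int) v) st := by
  intro n
  induction n with
  | zero =>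
    intro s hlen _ st
    have hs : s = [] := List.eq_nil_of_length_eq_zero (Nat.le_zero.1 hlen)
    subst hs
    simp [bloop, PySem.List.dedup_eq_ofList]
  | succ m ih =>
    intro s hlen hp st
    rcases s with _ | ⟨x, rest⟩
    · simp [bloop, PySem.List.dedup_eq_ofList]
    · simp only [bloop]
      set t : List Int := rest.takeWhile (fun y => y == x) with hT
      set r : List Int := rest.dropWhile (fun y => y == x) with hR
      have htr : t ++ r = rest := List.takeWhile_append_dropWhile
      have h1 : ∀ y ∈ t, y = x := fun y hy => by
        have := List.mem_takeWhile_imp (hT ▸ hy)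
        exact beq_iff_eq.1 this
      have hall : ∀ y ∈ rest, x ≤ y := (List.pairwise_cons.1 hp).1
      have hptail : rest.Pairwise (· ≤ ·) := (List.pairwise_cons.1 hp).2
      have h2 : x ∉ r := hR ▸ not_mem_dropWhile_beq x rest hptail hall
      have hpr : r.Pairwise (· ≤ ·) := List.Pairwise.sublist (hR ▸ List.dropWhile_sublist _) hptail
      have hlenr : r.length ≤ m := by
        have h3 : r.length ≤ rest.length := hR ▸ List.length_dropWhile_le _ _
        have h4 : rest.length + 1 ≤ m + 1 := by simpa using hlen
        omega
      rw [ih r hlenr hpr]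
      rw [← htr]
      rw [dedup_cons_all x t r h1 h2, List.foldl_cons]
      rw [count_cons_append_self x t r h1 h2]
      exact PySem.List.foldl_congr_mem _ _ _ _ (fun acc v hv => by
        have hvr : v ∈ r := (PySem.List.mem_dedup _ _).1 hv
        have hvx : v ≠ x := fun h => h2 (h ▸ hvr)
        rw [count_cons_append_other x v t r h1 hvx])

-- characterisation of the bupd-fold: it returns the running maximum together with the first
-- two elements attaining it
lemma fold_char (c : Int → Int) : ∀ (D : List Int) (b : Int) (f s : Option Int),
    D.foldl (fun acc v => bupd acc (c v) v) (b, f, s) =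
      if b < D.foldl (fun a w => max a (c w)) b then
        (D.foldl (fun a w => max a (c w)) b,
         (D.filter (fun v => c v == D.foldl (fun a w => max a (c w)) b)).head?,
         (D.filter (fun v => c v == D.foldl (fun a w => max a (c w)) b))[1]?)
      else (b, f, s.or (D.filter (fun v => c v == b)).head?) := by
  intro D
  induction D with
  | nil =>
    intro b f s
    simp
  | cons v rest ih =>
    intro b f s
    have hle : ∀ b0 : Int, b0 ≤ rest.foldl (fun a w => max a (c w)) b0 := fun b0 =>
      (PySem.List.le_foldl_max_int rest c b0).1
    simp only [List.foldl_cons, List.filter_cons]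
    by_cases hgt : b < c v
    · have hb : bupd (b, f, s) (c v) v = (c v, some v, none) := by
        simp [bupd, hgt]
      rw [hb, ih, max_eq_right hgt.le]
      by_cases h2 : c v < rest.foldl (fun a w => max a (c w)) (c v)
      · have hbM : b < rest.foldl (fun a w => max a (c w)) (c v) := hgt.trans h2
        have hne : (c v == rest.foldl (fun a w => max a (c w)) (c v)) = false :=
          beq_eq_false_iff_ne.2 (ne_of_lt h2)
        rw [if_pos h2, if_pos hbM, hne]
        simp
      · have hM : rest.foldl (fun a w => max a (c w)) (c v) = c v :=
          le_antisymm (not_lt.1 h2) (hle (c v))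
        rw [if_neg h2, hM, if_pos hgt]
        have heqv : (c v == c v) = true := by simp
        rw [heqv]
        simp [List.head?_eq_getElem?]
    · have hvb : c v ≤ b := not_lt.1 hgt
      rw [max_eq_left hvb]
      by_cases heq : c v = b
      · by_cases hsn : s = none
        · have hb : bupd (b, f, s) (c v) v = (b, f, some v) := by
            simp [bupd, heq, hsn]
          rw [hb, ih]
          by_cases h2 : b < rest.foldl (fun a w => max a (c w)) b
          · have hne : (c v == rest.foldl (fun a w => max a (c w)) b) = false := by
              rw [heq]; exact beq_eq_false_iff_ne.2 (ne_of_lt h2)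
            rw [if_pos h2, if_pos h2, hne]
            simp
          · have heqb : (c v == b) = true := beq_iff_eq.2 heq
            rw [if_neg h2, if_neg h2, hsn, heqb]
            simp
        · obtain ⟨y, hy⟩ := Option.ne_none_iff_exists'.1 hsn
          have hb : bupd (b, f, s) (c v) v = (b, f, s) := by
            simp [bupd, hgt, hy]
          rw [hb, ih]
          by_cases h2 : b < rest.foldl (fun a w => max a (c w)) b
          · have hne : (c v == rest.foldl (fun a w => max a (c w)) b) = false := by
              rw [heq]; exact beq_eq_false_iff_ne.2 (ne_of_lt h2)
            rw [if_pos h2, if_pos h2, hne]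
            simp
          · rw [if_neg h2, if_neg h2, hy]
            simp
      · have hlt : c v < b := lt_of_le_of_ne hvb heq
        have hb : bupd (b, f, s) (c v) v = (b, f, s) := by
          simp [bupd, hgt, heq]
        rw [hb, ih]
        by_cases h2 : b < rest.foldl (fun a w => max a (c w)) b
        · have hne : (c v == rest.foldl (fun a w => max a (c w)) b) = false :=
            beq_eq_false_iff_ne.2 (ne_of_lt (hlt.trans h2))
          rw [if_pos h2, if_pos h2, hne]
          simp
        · have hne : (c v == b) = false := beq_eq_false_iff_ne.2 (ne_of_lt hlt)
          rw [if_neg h2, if_neg h2, hne]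
          simp

-- fold_char specialised to the count function actually used
lemma fold_char_applied (nums D : List Int) (b : Int) (f s : Option Int) :
    D.foldl (fun acc v => bupd acc ((nums.count v : Nat) : Int) v) (b, f, s) =
      if b < D.foldl (fun a w => max a ((nums.count w : Nat) : Int)) b then
        (D.foldl (fun a w => max a ((nums.count w : Nat) : Int)) b,
         (D.filter (fun v => ((nums.count v : Nat) : Int) ==
            D.foldl (fun a w => max a ((nums.count w : Nat) : Int)) b)).head?,
         (D.filter (fun v => ((nums.count v : Nat) : Int) ==
            D.foldl (fun a w => max a ((nums.count w : Nat) : Int)) b))[1]?)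
      else (b, f, s.or (D.filter (fun v => ((nums.count v : Nat) : Int) == b)).head?) :=
  fold_char (fun v => ((nums.count v : Nat) : Int)) D b f s

-- proof-only helpers: the canonical mode list (ascending distinct values of maximal count)
def Dd (nums : List Int) : List Int :=
  PySem.List.dedup (PySem.List.sorted nums (fun x => x) false)

def Mm (nums : List Int) : Int :=
  (Dd nums).foldl (fun a w => max a ((nums.count w : Nat) : Int)) 0

def modesOf (nums : List Int) : List Int :=
  (Dd nums).filter (fun v => ((nums.count v : Nat) : Int) == Mm nums)

def pick (l : List Int) : Int :=
  match l[1]? with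
  | some y => y
  | none => l.head?.getD 0

lemma exists_mem_of_ne_nil (nums : List Int) (hpre : nums ≠ []) : ∃ x0, x0 ∈ nums := by
  rcases nums with _ | ⟨a, l⟩
  · exact absurd rfl hpre
  · exact ⟨a, List.mem_cons_self ..⟩

lemma Mm_pos (nums : List Int) (hpre : nums ≠ []) : (0 : Int) < Mm nums := by
  obtain ⟨x0, hx0⟩ := exists_mem_of_ne_nil nums hpre
  have hx0d : x0 ∈ Dd nums := by
    unfold Dd
    rw [PySem.List.mem_dedup, PySem.List.mem_sorted]
    exact hx0
  have h1c : (1 : Int) ≤ ((nums.count x0 : Nat) : Int) := by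
    exact_mod_cast List.count_pos_iff.2 hx0
  exact lt_of_lt_of_le one_pos (le_trans h1c
    ((PySem.List.le_foldl_max_int (Dd nums) (fun w => ((nums.count w : Nat) : Int)) 0).2 x0 hx0d))

lemma exists_mode (nums : List Int) (hpre : nums ≠ []) :
    ∃ v ∈ Dd nums, ((nums.count v : Nat) : Int) = Mm nums := by
  have hfm := PySem.List.foldl_max_mem ((Dd nums).map (fun w => ((nums.count w : Nat) : Int))) 0
  rw [List.foldl_map] at hfm
  rcases hfm with h | h
  · exfalso
    have h0 := Mm_pos nums hpre
    have hM0 : Mm nums = 0 := h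
    omega
  · obtain ⟨v, hv, hveq⟩ := List.mem_map.1 h
    exact ⟨v, hv, hveq⟩

lemma modesOf_ne_nil (nums : List Int) (hpre : nums ≠ []) : modesOf nums ≠ [] := by
  obtain ⟨v, hv, hveq⟩ := exists_mode nums hpre
  exact List.ne_nil_of_mem (List.mem_filter.2 ⟨hv, by simp [hveq]⟩)

lemma Dd_pairwise_lt (nums : List Int) : (Dd nums).Pairwise (· < ·) := by
  have hle : (Dd nums).Pairwise (· ≤ ·) :=
    List.Pairwise.sublist (dedup_sublist _) (PySem.List.sorted_pairwise nums (fun x => x))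
  have hnd : (Dd nums).Pairwise (· ≠ ·) := PySem.List.nodup_dedup _
  exact (hle.and hnd).imp (fun h => lt_of_le_of_ne h.1 h.2)

lemma modesOf_pairwise_lt (nums : List Int) : (modesOf nums).Pairwise (· < ·) := by
  unfold modesOf
  exact List.Pairwise.sublist List.filter_sublist (Dd_pairwise_lt nums)

lemma Dd_perm_ofList (nums : List Int) : (Dd nums).Perm (PySem.Set.ofList nums) :=
  (List.perm_ext_iff_of_nodup (PySem.List.nodup_dedup _) (PySem.Set.nodup_ofList _)).2
    (fun a => by
      rw [PySem.List.mem_dedup, PySem.List.mem_sorted, PySem.Set.mem_ofList])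

lemma maxA_eq (nums : List Int) (k0 : Int) (ktail : List Int)
    (hof : PySem.Set.ofList nums = k0 :: ktail) (hpre : nums ≠ []) :
    (ktail.map (fun k => ((nums.count k : Nat) : Int))).foldl max ((nums.count k0 : Nat) : Int)
      = Mm nums := by
  have hboundD : ∀ u ∈ Dd nums, ((nums.count u : Nat) : Int) ≤ Mm nums := fun u hu =>
    (PySem.List.le_foldl_max_int (Dd nums) (fun w => ((nums.count w : Nat) : Int)) 0).2 u hu
  have hmem_of : ∀ u, u ∈ PySem.Set.ofList nums → u ∈ Dd nums := fun u hu =>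
    (Dd_perm_ofList nums).mem_iff.2 hu
  apply le_antisymm
  · rcases PySem.List.foldl_max_mem (ktail.map (fun k => ((nums.count k : Nat) : Int)))
        ((nums.count k0 : Nat) : Int) with h | h
    · rw [h]
      exact hboundD k0 (hmem_of k0 (hof ▸ List.mem_cons_self ..))
    · obtain ⟨u, hu, hueq⟩ := List.mem_map.1 h
      rw [← hueq]
      exact hboundD u (hmem_of u (hof ▸ List.mem_cons_of_mem _ hu))
  · obtain ⟨v, hv, hveq⟩ := exists_mode nums hpre
    rw [← hveq]
    have hvof : v ∈ PySem.Set.ofList nums := (Dd_perm_ofList nums).mem_iff.1 hv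
    rw [hof] at hvof
    rcases List.mem_cons.1 hvof with rfl | hvt
    · exact (PySem.List.le_foldl_max _ _).1
    · exact (PySem.List.le_foldl_max _ _).2 _
        (List.mem_map_of_mem (f := fun k => ((nums.count k : Nat) : Int)) hvt)

lemma pick_spec (l : List Int) (h : l ≠ []) :
    (if l.length > 1 then PySem.List.pyGetD l 1 0 else PySem.List.pyGetD l 0 0) = pick l := by
  match l with
  | [] => exact absurd rfl h
  | [m] => simp [pick, PySem.List.pyGetD_ofNat']
  | m :: y :: t => simp [pick, PySem.List.pyGetD_ofNat']

lemma B_eq_pick (nums : List Int) (hpre : nums ≠ []) :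
    second_smallest_mode_alt nums = pick (modesOf nums) := by
  obtain ⟨x0, hx0⟩ := exists_mem_of_ne_nil nums hpre
  have hx0d : x0 ∈ PySem.List.dedup (PySem.List.sorted nums (fun x => x) false) := by
    rw [PySem.List.mem_dedup, PySem.List.mem_sorted]
    exact hx0
  have h1c : (1 : Int) ≤ ((nums.count x0 : Nat) : Int) := by
    exact_mod_cast List.count_pos_iff.2 hx0
  have h0 : (0 : Int) < (PySem.List.dedup (PySem.List.sorted nums (fun x => x) false)).foldl
      (fun a w => max a ((nums.count w : Nat) : Int)) 0 :=
    lt_of_lt_of_le one_pos (le_trans h1c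
      ((PySem.List.le_foldl_max_int _ (fun w => ((nums.count w : Nat) : Int)) 0).2 x0 hx0d))
  have hbl : bloop (PySem.List.sorted nums (fun x => x) false) (0, none, none)
      = (Mm nums, (modesOf nums).head?, (modesOf nums)[1]?) := by
    rw [bloop_eq (PySem.List.sorted nums (fun x => x) false).length _ le_rfl
        (PySem.List.sorted_pairwise nums (fun x => x))]
    rw [PySem.List.foldl_congr_mem _ _
        (fun acc v => bupd acc ((nums.count v : Nat) : Int) v) _
        (fun acc v _ => by
          rw [(PySem.List.sorted_perm nums (fun x => x) false).count_eq])]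
    rw [fold_char_applied, if_pos h0]
    rfl
  simp only [second_smallest_mode_alt]
  rw [hbl]
  cases hx : (modesOf nums)[1]? with
  | none => simp [pick, hx]
  | some y => simp [pick, hx]

lemma A_eq_pick (nums : List Int) (hpre : nums ≠ []) :
    second_smallest_mode nums = pick (modesOf nums) := by
  obtain ⟨x0, hx0⟩ := exists_mem_of_ne_nil nums hpre
  have hfreq : nums.foldl (fun d num => if d.contains num then d.insert num (d.getD num 0 + 1)
      else d.insert num 1) PySem.Dict.empty = PySem.Dict.counter nums := by
    rw [show (fun (d : PySem.Dict Int Int) num => if d.contains num then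
          d.insert num (d.getD num 0 + 1) else d.insert num 1)
        = fun d num => d.insert num (d.getD num 0 + 1) from ?side]
    · exact PySem.Dict.foldl_insert_getD_add_one_eq_counter nums
    case side =>
      funext d num
      by_cases h : d.contains num
      · simp [h]
      · have hf : d.contains num = false := by simpa using h
        simp [hf, PySem.Dict.getD_of_not_contains d 0 hf]
  have hvals : (PySem.Dict.counter nums).values
      = (PySem.Set.ofList nums).map (fun k => ((nums.count k : Nat) : Int)) := by
    simp [PySem.Dict.values, PySem.Dict.items_counter, List.map_map]
  obtain ⟨k0, ktail, hof⟩ := List.exists_cons_of_ne_nil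
    (List.ne_nil_of_mem ((PySem.Set.mem_ofList nums x0).2 hx0))
  have hitems : ((PySem.Dict.counter nums).items.filter (fun p => p.2 == Mm nums)).map
        (fun p => p.1)
      = (PySem.Set.ofList nums).filter (fun k => ((nums.count k : Nat) : Int) == Mm nums) := by
    rw [PySem.Dict.items_counter, List.filter_map]
    simp [Function.comp_def, List.map_map]
  have hsorted : PySem.List.sorted
        ((PySem.Set.ofList nums).filter (fun k => ((nums.count k : Nat) : Int) == Mm nums))
        (fun x => x) false
      = modesOf nums := by
    apply PySem.List.sorted_eq_of_perm_of_pairwise_lt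
    · unfold modesOf
      exact (Dd_perm_ofList nums).filter _
    · exact modesOf_pairwise_lt nums
  simp only [second_smallest_mode]
  rw [hfreq]
  simp only [hvals, hof, List.map_cons, PySem.List.max?_id_cons, Option.getD_some]
  rw [maxA_eq nums k0 ktail hof hpre]
  rw [hitems, hsorted]
  exact pick_spec _ (modesOf_ne_nil nums hpre)

-- ===== VERDICT (by name: the statement is the Claim_ definition above) =====
theorem second_smallest_mode_spec : Claim_equal_second_smallest_mode := by
  intro nums _hdom hpre
  unfold Spec_second_smallest_mode
  rw [A_eq_pick nums hpre, B_eq_pick nums hpre]
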